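-- pv_equiv track=rewrite | github.com/woshi-Ivy/AI-Learning-Log | UavNetSim-master/visualization/visualizer.py | _get_latest_comms
-- ===== SOURCE A (Python) =====
-- def _get_latest_comms(comms, packet_type):
--     """
--     Get only the latest communication for each src-dst pair
--
--     Parameters:
--         comms: List of communication events
--         packet_type: Type of packet (DATA, ACK, HELLO)
--
--     Returns:
--         List of latest communication events for each src-dst pair
--     """
--     # Filter by packet type
--     type_comms = [e for e in comms if e[3] == packet_type]
--
--     # Dictionary to store latest comm for each src-dst pair
--     latest_comms_dict = {}
--
--     # For each src-dst pair, keep only the comm with the latest timestamp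
--     for comm in type_comms:
--         src_id, dst_id = comm[0], comm[1]
--         pair_key = (src_id, dst_id)
--
--         # If this is the first comm for this pair, or has a later timestamp
--         if pair_key not in latest_comms_dict or comm[4] > latest_comms_dict[pair_key][4]:
--             latest_comms_dict[pair_key] = comm
--
--     # Return the values (latest comms)
--     return list(latest_comms_dict.values())
-- ===== SOURCE B (Python) =====
-- def _get_latest_comms(comms, packet_type):
--     # Group matching comms per (src, dst) pair, then reduce each group with max
--     # (first element attaining the maximal timestamp, like A's strict-> update).
--     groups = {}
--     for e in comms:
--         if e[3] == packet_type:
--             key = (e[0], e[1])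
--             groups[key] = groups.get(key, []) + [e]
--     return [max(g, key=lambda e: e[4]) for g in groups.values()]
-- ===== Notes on version B (the rewrite author's own statement) =====
-- stated objective: alternative
-- what changed: B builds a dict of full per-pair lists of matching comms in one grouping pass and then reduces each group with max(g, key=e[4]) (first maximal element), instead of A's filter pass plus a running-best dict updated on strictly-later timestamps.
import Mathlib
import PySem

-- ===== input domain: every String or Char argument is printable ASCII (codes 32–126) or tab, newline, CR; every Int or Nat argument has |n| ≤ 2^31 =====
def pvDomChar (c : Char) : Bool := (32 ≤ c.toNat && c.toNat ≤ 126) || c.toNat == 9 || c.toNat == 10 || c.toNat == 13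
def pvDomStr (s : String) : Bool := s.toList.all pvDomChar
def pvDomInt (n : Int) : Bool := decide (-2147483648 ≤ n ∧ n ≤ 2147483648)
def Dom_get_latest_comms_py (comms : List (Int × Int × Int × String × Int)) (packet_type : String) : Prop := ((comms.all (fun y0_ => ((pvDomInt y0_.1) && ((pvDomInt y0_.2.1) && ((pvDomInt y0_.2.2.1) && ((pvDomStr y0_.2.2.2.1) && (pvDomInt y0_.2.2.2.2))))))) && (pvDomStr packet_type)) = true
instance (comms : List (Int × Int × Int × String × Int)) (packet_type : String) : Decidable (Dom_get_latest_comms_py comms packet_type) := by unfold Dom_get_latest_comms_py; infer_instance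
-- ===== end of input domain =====

-- B groups the matching comms per (src,dst) pair and reduces each group with max afterwards,
-- instead of A's single running-best dictionary; same values, alternative decomposition.

-- ===== PORT A =====
-- literal transliteration of A: filter by packet type, running latest-comm dict, values
def get_latest_comms_py (comms : List (Int × Int × Int × String × Int)) (packet_type : String) : List (Int × Int × Int × String × Int) :=
  let type_comms := comms.filter (fun e => e.2.2.2.1 == packet_type)
  let latest := type_comms.foldl (fun d comm =>
      match d.get? (comm.1, comm.2.1) with
      | none => d.insert (comm.1, comm.2.1) comm
      | some cur => if cur.2.2.2.2 < comm.2.2.2.2 then d.insert (comm.1, comm.2.1) comm else d)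
    PySem.Dict.empty
  latest.values

-- ===== PORT B =====
-- literal transliteration of B: one grouping pass (groups[key] = groups.get(key, []) + [e]),
-- then max(g, key=lambda e: e[4]) per group; max never sees an empty group, so the
-- filterMap over max? (none exactly on []) drops nothing.
def get_latest_comms_py_alt (comms : List (Int × Int × Int × String × Int)) (packet_type : String) : List (Int × Int × Int × String × Int) :=
  let groups := comms.foldl (fun d e =>
      if e.2.2.2.1 == packet_type then
        d.insert (e.1, e.2.1) (d.getD (e.1, e.2.1) [] ++ [e])
      else d)
    PySem.Dict.empty
  groups.values.filterMap (fun g => PySem.List.max? g (fun e => e.2.2.2.2))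

-- ===== PRECONDITION & SPEC =====
def Spec_get_latest_comms_py (comms : List (Int × Int × Int × String × Int)) (packet_type : String) (out : List (Int × Int × Int × String × Int)) : Prop := out = get_latest_comms_py_alt comms packet_type
instance (comms : List (Int × Int × Int × String × Int)) (packet_type : String) (out : List (Int × Int × Int × String × Int)) : Decidable (Spec_get_latest_comms_py comms packet_type out) := by unfold Spec_get_latest_comms_py; infer_instance

-- ===== CLAIM (what is proved, stated in full; the proofs are below) =====
def Claim_equal_get_latest_comms_py : Prop := ∀ (comms : List (Int × Int × Int × String × Int)) (packet_type : String), Dom_get_latest_comms_py comms packet_type → Spec_get_latest_comms_py comms packet_type (get_latest_comms_py comms packet_type)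

-- ===== LEMMAS AND PROOFS =====

-- first element of grp attaining the maximal timestamp (total helper; default unused on [])
def pvBest (grp : List (Int × Int × Int × String × Int)) : Int × Int × Int × String × Int :=
  match PySem.List.max? grp (fun e => e.2.2.2.2) with
  | some m => m
  | none => (0, 0, 0, "", 0)

theorem max?_eq_some_pvBest (grp : List (Int × Int × Int × String × Int)) (h : grp ≠ []) :
    PySem.List.max? grp (fun e => e.2.2.2.2) = some (pvBest grp) := by
  cases hm : PySem.List.max? grp (fun e => e.2.2.2.2) with
  | none => exact absurd ((PySem.List.max?_eq_none_iff grp _).1 hm) h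
  | some m => simp [pvBest, hm]

theorem pvBest_append (grp : List (Int × Int × Int × String × Int))
    (e : Int × Int × Int × String × Int) (h : grp ≠ []) :
    pvBest (grp ++ [e]) =
      if (pvBest grp).2.2.2.2 < e.2.2.2.2 then e else pvBest grp := by
  have h1 := max?_eq_some_pvBest grp h
  have h2 : PySem.List.max? (grp ++ [e]) (fun x => x.2.2.2.2) =
      if (pvBest grp).2.2.2.2 < e.2.2.2.2 then some e else some (pvBest grp) := by
    simp only [PySem.List.max?] at h1 ⊢
    rw [List.foldl_append, h1]
    simp [List.foldl]
  by_cases hc : (pvBest grp).2.2.2.2 < e.2.2.2.2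
  · rw [if_pos hc] at h2 ⊢
    unfold pvBest
    rw [h2]
  · rw [if_neg hc] at h2 ⊢
    unfold pvBest
    rw [h2, h1]

theorem get?_mk_map (l : List ((Int × Int) × List (Int × Int × Int × String × Int)))
    (k : Int × Int) :
    (PySem.Dict.mk (l.map (fun p => (p.1, pvBest p.2)))).get? k
      = ((PySem.Dict.mk l).get? k).map pvBest := by
  induction l with
  | nil => rfl
  | cons p t ih =>
      by_cases hk : p.1 == k
      · rw [List.map_cons, PySem.Dict.get?_mk_cons, PySem.Dict.get?_mk_cons, if_pos hk, if_pos hk]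
        rfl
      · rw [List.map_cons, PySem.Dict.get?_mk_cons, PySem.Dict.get?_mk_cons, if_neg hk, if_neg hk]
        exact ih

theorem get?_rel (dA : PySem.Dict (Int × Int) (Int × Int × Int × String × Int))
    (dB : PySem.Dict (Int × Int) (List (Int × Int × Int × String × Int)))
    (H : dA.items = dB.items.map (fun p => (p.1, pvBest p.2))) (k : Int × Int) :
    dA.get? k = (dB.get? k).map pvBest := by
  cases dA with
  | mk la =>
      cases dB with
      | mk lb =>
          subst H
          exact get?_mk_map lb k

-- the loop invariant: A's dict holds, per pair, the first timestamp-maximal element of B's group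
theorem loop_lemma (l : List (Int × Int × Int × String × Int))
    (dA : PySem.Dict (Int × Int) (Int × Int × Int × String × Int))
    (dB : PySem.Dict (Int × Int) (List (Int × Int × Int × String × Int)))
    (H : dA.items = dB.items.map (fun p => (p.1, pvBest p.2)))
    (HN : dB.keys.Nodup)
    (Hne : ∀ p ∈ dB.items, p.2 ≠ []) :
    ((l.foldl (fun d comm =>
        match d.get? (comm.1, comm.2.1) with
        | none => d.insert (comm.1, comm.2.1) comm
        | some cur => if cur.2.2.2.2 < comm.2.2.2.2 then d.insert (comm.1, comm.2.1) comm else d) dA).items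
      = (l.foldl (fun d e => d.insert (e.1, e.2.1) (d.getD (e.1, e.2.1) [] ++ [e])) dB).items.map
          (fun p => (p.1, pvBest p.2)))
    ∧ (l.foldl (fun d e => d.insert (e.1, e.2.1) (d.getD (e.1, e.2.1) [] ++ [e])) dB).keys.Nodup
    ∧ (∀ p ∈ (l.foldl (fun d e => d.insert (e.1, e.2.1) (d.getD (e.1, e.2.1) [] ++ [e])) dB).items, p.2 ≠ []) := by
  induction l generalizing dA dB with
  | nil => exact ⟨H, HN, Hne⟩
  | cons e t ih =>
      have Hget := get?_rel dA dB H (e.1, e.2.1)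
      simp only [List.foldl_cons]
      cases hB : dB.get? (e.1, e.2.1) with
      | none =>
          have hA : dA.get? (e.1, e.2.1) = none := by rw [Hget, hB]; rfl
          have hcB : dB.contains (e.1, e.2.1) = false := by
            rw [PySem.Dict.contains_eq_isSome_get?, hB]; rfl
          have hcA : dA.contains (e.1, e.2.1) = false := by
            rw [PySem.Dict.contains_eq_isSome_get?, hA]; rfl
          have hgD : dB.getD (e.1, e.2.1) [] = [] := by
            rw [PySem.Dict.getD_eq_get?_getD, hB]; rfl
          rw [hA, hgD]
          apply ih
          · rw [PySem.Dict.items_insert_of_not_contains dA e hcA,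
              PySem.Dict.items_insert_of_not_contains dB _ hcB, List.map_append, H]
            rfl
          · exact PySem.Dict.nodup_keys_insert dB _ _ HN
          · intro p hp
            rcases (PySem.Dict.mem_items_insert dB _ _ p).1 hp with h | h
            · subst h; simp
            · exact Hne p h.1
      | some grp =>
          have hgrpmem : ((e.1, e.2.1), grp) ∈ dB.items :=
            PySem.Dict.mem_items_of_get?_eq_some dB hB
          have hgrpne : grp ≠ [] := Hne _ hgrpmem
          have hA : dA.get? (e.1, e.2.1) = some (pvBest grp) := by rw [Hget, hB]; rfl
          have hcB : dB.contains (e.1, e.2.1) = true := by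
            rw [PySem.Dict.contains_eq_isSome_get?, hB]; rfl
          have hcA : dA.contains (e.1, e.2.1) = true := by
            rw [PySem.Dict.contains_eq_isSome_get?, hA]; rfl
          have hgD : dB.getD (e.1, e.2.1) [] = grp := by
            rw [PySem.Dict.getD_eq_get?_getD, hB]; rfl
          rw [hA, hgD]
          have hred : (match some (pvBest grp) with
              | none => dA.insert (e.1, e.2.1) e
              | some cur => if cur.2.2.2.2 < e.2.2.2.2 then dA.insert (e.1, e.2.1) e else dA)
              = if (pvBest grp).2.2.2.2 < e.2.2.2.2 then dA.insert (e.1, e.2.1) e else dA := rfl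
          rw [hred]
          have hNne : ∀ p ∈ (dB.insert (e.1, e.2.1) (grp ++ [e])).items, p.2 ≠ [] := by
            intro p hp
            rcases (PySem.Dict.mem_items_insert dB _ _ p).1 hp with h | h
            · subst h; simp
            · exact Hne p h.1
          have hNN := PySem.Dict.nodup_keys_insert dB (e.1, e.2.1) (grp ++ [e]) HN
          by_cases hc : (pvBest grp).2.2.2.2 < e.2.2.2.2
          · rw [if_pos hc]
            apply ih _ _ _ hNN hNne
            rw [PySem.Dict.items_insert_of_contains dA e hcA,
              PySem.Dict.items_insert_of_contains dB _ hcB, H, List.map_map, List.map_map]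
            apply List.map_congr_left
            intro p _
            by_cases hpk : p.1 == (e.1, e.2.1) <;>
              simp [Function.comp, hpk, pvBest_append grp e hgrpne, hc]
          · rw [if_neg hc]
            apply ih _ _ _ hNN hNne
            rw [PySem.Dict.items_insert_of_contains dB _ hcB, H, List.map_map]
            apply List.map_congr_left
            intro p hp
            by_cases hpk : p.1 == (e.1, e.2.1)
            · have hpeq : p = ((e.1, e.2.1), p.2) := by
                have := eq_of_beq hpk
                exact Prod.ext this rfl
              have : dB.get? (e.1, e.2.1) = some p.2 := by
                apply PySem.Dict.get?_of_mem_items _ _ HN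
                rw [← hpeq]; exact hp
              have hp2 : p.2 = grp := by
                rw [hB] at this; exact (Option.some.injEq _ _ ▸ this.symm)
              simp [Function.comp, pvBest_append grp e hgrpne, hc, hp2, eq_of_beq hpk]
            · simp [Function.comp, hpk]

-- ===== VERDICT (by name: the statement is the Claim_ definition above) =====
theorem get_latest_comms_py_spec : Claim_equal_get_latest_comms_py := by
  intro comms packet_type _
  unfold Spec_get_latest_comms_py get_latest_comms_py get_latest_comms_py_alt
  show ((comms.filter (fun e => e.2.2.2.1 == packet_type)).foldl (fun d comm =>
      match d.get? (comm.1, comm.2.1) with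
      | none => d.insert (comm.1, comm.2.1) comm
      | some cur => if cur.2.2.2.2 < comm.2.2.2.2 then d.insert (comm.1, comm.2.1) comm else d)
      PySem.Dict.empty).values
    = (comms.foldl (fun d e =>
        if e.2.2.2.1 == packet_type then
          d.insert (e.1, e.2.1) (d.getD (e.1, e.2.1) [] ++ [e])
        else d) PySem.Dict.empty).values.filterMap (fun g => PySem.List.max? g (fun e => e.2.2.2.2))
  have hfold := (List.foldl_filter
    (p := fun (e : Int × Int × Int × String × Int) => e.2.2.2.1 == packet_type)
    (f := fun (d : PySem.Dict (Int × Int) (List (Int × Int × Int × String × Int))) e =>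
      d.insert (e.1, e.2.1) (d.getD (e.1, e.2.1) [] ++ [e]))
    (l := comms) (init := PySem.Dict.empty)).symm
  rw [hfold]
  obtain ⟨Hitems, _, Hne⟩ := loop_lemma (comms.filter (fun e => e.2.2.2.1 == packet_type))
    PySem.Dict.empty PySem.Dict.empty rfl (by simp [PySem.Dict.keys, PySem.Dict.empty])
    (by simp [PySem.Dict.empty])
  simp only [PySem.Dict.values]
  rw [Hitems, List.filterMap_map]
  rw [List.filterMap_congr (g := fun p => some (pvBest p.2))
    (by intro p hp; exact max?_eq_some_pvBest p.2 (Hne p hp))]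
  simp [List.map_map, Function.comp]
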